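-- pv_equiv track=rewrite | github.com/MohamadAlMokdad/reverse-queue | reverse-queue.py | reverse_sequence_with_stack_and_queue
-- ===== SOURCE A (Python) =====
-- from collections import deque
--
-- class Stack:
--     def __init__(self):
--         self.stack = []
--
--     def push(self, item):
--         self.stack.append(item)
--
--     def pop(self):
--         if self.is_empty():
--             return None
--         return self.stack.pop()
--
--     def is_empty(self):
--         return len(self.stack) == 0
--
-- class Queue:
--     def __init__(self):
--         self.queue = deque()
--
--     def enqueue(self, item):
--         self.queue.append(item)
--
--     def dequeue(self):
--         if self.is_empty():
--             return None
--         return self.queue.popleft()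
--
--     def is_empty(self):
--         return len(self.queue) == 0
--
-- def reverse_sequence_with_stack_and_queue(input_sequence):
--     stack = Stack()
--     queue = Queue()
--
--     # Step 1: Enqueue elements to the queue
--     for item in input_sequence:
--         queue.enqueue(item)
--
--     # Step 2: Push elements from the queue to the stack
--     while not queue.is_empty():
--         stack.push(queue.dequeue())
--
--     # Step 3: Transfer the elements back to the queue (reversing the order)
--     reversed_sequence = []
--     while not stack.is_empty():
--         reversed_sequence.append(stack.pop())
--
--     # Return the reversed sequence as a string
--     return ''.join(map(str, reversed_sequence))
-- ===== SOURCE B (Python) =====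
-- def reverse_sequence_with_stack_and_queue(input_sequence):
--     items = list(input_sequence)
--     return ''.join(map(str, reversed(items)))
-- ===== Notes on version B (the rewrite author's own statement) =====
-- stated objective: simpler
-- what changed: Removes the Stack and Queue classes and the three transfer loops; B materializes the input once and joins the built-in reversed view directly.
import Mathlib
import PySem

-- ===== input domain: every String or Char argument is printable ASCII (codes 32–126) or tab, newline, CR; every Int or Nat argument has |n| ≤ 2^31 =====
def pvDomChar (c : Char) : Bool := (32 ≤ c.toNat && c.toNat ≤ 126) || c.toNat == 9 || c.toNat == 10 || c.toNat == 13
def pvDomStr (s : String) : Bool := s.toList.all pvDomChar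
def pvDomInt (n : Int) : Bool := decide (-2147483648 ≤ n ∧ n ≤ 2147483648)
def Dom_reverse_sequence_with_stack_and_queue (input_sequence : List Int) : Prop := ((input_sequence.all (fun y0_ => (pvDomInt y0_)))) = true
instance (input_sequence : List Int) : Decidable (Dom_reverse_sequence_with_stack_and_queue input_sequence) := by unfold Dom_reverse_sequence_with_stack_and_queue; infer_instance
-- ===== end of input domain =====

-- B removes the Stack/Queue classes and the three transfer loops; it reverses once and joins.

-- ===== PORT A =====
-- Step 3 loop: pop the stack (head of the cons-built stack) until empty, appending to reversed_sequence.
def pvDrainStack (s acc : List Int) : List Int :=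
  match s with
  | [] => acc
  | h :: t => pvDrainStack t (acc ++ [h])

def reverse_sequence_with_stack_and_queue (input_sequence : List Int) : String :=
  -- Step 1: enqueue elements to the queue
  let queue := input_sequence.foldl (fun q item => q ++ [item]) []
  -- Step 2: dequeue from the queue front, pushing onto the stack
  let stack := queue.foldl (fun st item => item :: st) []
  -- Step 3: pop the stack into reversed_sequence
  let reversed_sequence := pvDrainStack stack []
  PySem.Str.join "" (reversed_sequence.map PySem.Int.toStr)

-- ===== PORT B =====
def reverse_sequence_with_stack_and_queue_alt (input_sequence : List Int) : String :=
  PySem.Str.join "" (input_sequence.reverse.map PySem.Int.toStr)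

-- ===== PRECONDITION & SPEC =====
def Spec_reverse_sequence_with_stack_and_queue (input_sequence : List Int) (out : String) : Prop := out = reverse_sequence_with_stack_and_queue_alt input_sequence
instance (input_sequence : List Int) (out : String) : Decidable (Spec_reverse_sequence_with_stack_and_queue input_sequence out) := by unfold Spec_reverse_sequence_with_stack_and_queue; infer_instance

-- ===== CLAIM =====
def Claim_equal_reverse_sequence_with_stack_and_queue : Prop := ∀ (input_sequence : List Int), Dom_reverse_sequence_with_stack_and_queue input_sequence → Spec_reverse_sequence_with_stack_and_queue input_sequence (reverse_sequence_with_stack_and_queue input_sequence)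

-- ===== LEMMAS AND PROOFS =====
theorem pvDrainStack_eq (s acc : List Int) : pvDrainStack s acc = acc ++ s := by
  induction s generalizing acc with
  | nil => simp [pvDrainStack]
  | cons h t ih => simp [pvDrainStack, ih]

theorem foldl_append_singleton (xs : List Int) : xs.foldl (fun q item => q ++ [item]) [] = xs := by
  have h : ∀ (xs acc : List Int), xs.foldl (fun q item => q ++ [item]) acc = acc ++ xs := by
    intro xs; induction xs with
    | nil => simp
    | cons h t ih => intro acc; simp [List.foldl, ih]
  simp [h]

theorem foldl_cons_rev (xs : List Int) : xs.foldl (fun st item => item :: st) [] = xs.reverse := by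
  have h : ∀ (xs acc : List Int), xs.foldl (fun st item => item :: st) acc = xs.reverse ++ acc := by
    intro xs; induction xs with
    | nil => simp
    | cons h t ih => intro acc; simp [List.foldl, ih]
  simp [h]

-- ===== VERDICT =====
theorem reverse_sequence_with_stack_and_queue_spec : Claim_equal_reverse_sequence_with_stack_and_queue := by
  intro xs _
  unfold Spec_reverse_sequence_with_stack_and_queue reverse_sequence_with_stack_and_queue reverse_sequence_with_stack_and_queue_alt
  simp only [foldl_append_singleton, foldl_cons_rev, pvDrainStack_eq, List.nil_append]
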